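-- pv_equiv track=rewrite | github.com/blab/trellis | trellis/genetic_code.py | mutant_aa_sequences
-- ===== SOURCE A (Python) =====
-- NUCLEOTIDES = "ACGT"
--
-- CODON_TABLE: dict[str, str] = {
--     "TTT": "F", "TTC": "F", "TTA": "L", "TTG": "L",
--     "CTT": "L", "CTC": "L", "CTA": "L", "CTG": "L",
--     "ATT": "I", "ATC": "I", "ATA": "I", "ATG": "M",
--     "GTT": "V", "GTC": "V", "GTA": "V", "GTG": "V",
--     "TCT": "S", "TCC": "S", "TCA": "S", "TCG": "S",
--     "CCT": "P", "CCC": "P", "CCA": "P", "CCG": "P",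
--     "ACT": "T", "ACC": "T", "ACA": "T", "ACG": "T",
--     "GCT": "A", "GCC": "A", "GCA": "A", "GCG": "A",
--     "TAT": "Y", "TAC": "Y", "TAA": "*", "TAG": "*",
--     "CAT": "H", "CAC": "H", "CAA": "Q", "CAG": "Q",
--     "AAT": "N", "AAC": "N", "AAA": "K", "AAG": "K",
--     "GAT": "D", "GAC": "D", "GAA": "E", "GAG": "E",
--     "TGT": "C", "TGC": "C", "TGA": "*", "TGG": "W",
--     "CGT": "R", "CGC": "R", "CGA": "R", "CGG": "R",
--     "AGT": "S", "AGC": "S", "AGA": "R", "AGG": "R",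
--     "GGT": "G", "GGC": "G", "GGA": "G", "GGG": "G",
-- }
--
-- def translate(dna_sequence: str) -> str:
--     """Translate a DNA sequence to amino acids using the standard genetic code.
--
--     Stop codons are translated to ``"*"`` and included in the output
--     (not truncated).
--     """
--     if len(dna_sequence) % 3 != 0:
--         raise ValueError(
--             f"DNA sequence length {len(dna_sequence)} is not divisible by 3"
--         )
--     codons = []
--     for i in range(0, len(dna_sequence), 3):
--         codon = dna_sequence[i : i + 3]
--         if codon not in CODON_TABLE:
--             raise ValueError(f"invalid codon {codon!r} at position {i}")
--         codons.append(CODON_TABLE[codon])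
--     return "".join(codons)
--
-- def single_nt_mutations(
--     dna_sequence: str,
-- ) -> list[tuple[str, int, str, str]]:
--     """Enumerate all single-nucleotide mutations of *dna_sequence*.
--
--     Returns a list of ``(mutant_dna, position, ref_base, alt_base)``
--     tuples, ordered by position then by ``NUCLEOTIDES`` order.
--     """
--     for i, base in enumerate(dna_sequence):
--         if base not in NUCLEOTIDES:
--             raise ValueError(f"invalid base {base!r} at position {i}")
--     seq = list(dna_sequence)
--     mutations: list[tuple[str, int, str, str]] = []
--     for i, ref in enumerate(seq):
--         for alt in NUCLEOTIDES:
--             if alt == ref: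
--                 continue
--             seq[i] = alt
--             mutations.append(("".join(seq), i, ref, alt))
--             seq[i] = ref
--     return mutations
--
-- def mutant_aa_sequences(
--     dna_sequence: str,
-- ) -> dict[str, list[str]]:
--     """Group single-nt mutants by their translated AA sequence.
--
--     Returns ``{aa_sequence: [mutant_dna, ...]}``.  The wildtype DNA is
--     not included in any value list.  Synonymous mutants appear under
--     the wildtype AA key.
--     """
--     groups: dict[str, list[str]] = {}
--     for mutant_dna, _, _, _ in single_nt_mutations(dna_sequence):
--         aa = translate(mutant_dna)
--         groups.setdefault(aa, []).append(mutant_dna)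
--     return groups
-- ===== SOURCE B (Python) =====
-- NUCLEOTIDES = "ACGT"
--
-- # amino acid of codon b0 b1 b2 at index 16*i0 + 4*i1 + i2, bases indexed in "ACGT" order
-- _AA64 = "KNKNTTTTRSRSIIMIQHQHPPPPRRRRLLLLEDEDAAAAGGGGVVVV*Y*YSSSS*CWCLFLF"
--
--
-- def mutant_aa_sequences(dna_sequence: str) -> dict[str, list[str]]:
--     # encode each base as its index in "ACGT", validating as we go
--     idx = []
--     for i, base in enumerate(dna_sequence):
--         j = NUCLEOTIDES.find(base)
--         if j < 0:
--             raise ValueError(f"invalid base {base!r} at position {i}")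
--         idx.append(j)
--     n = len(dna_sequence)
--     if n % 3 != 0:
--         raise ValueError(f"DNA sequence length {n} is not divisible by 3")
--     # wildtype codon indices and translated amino acids, computed once
--     codon_idx = [16 * idx[j] + 4 * idx[j + 1] + idx[j + 2] for j in range(0, n, 3)]
--     wt = [_AA64[c] for c in codon_idx]
--     groups: dict[str, list[str]] = {}
--     chars = list(dna_sequence)
--     for i, r in enumerate(idx):
--         ci = i // 3
--         w = (16, 4, 1)[i % 3]
--         for a in range(4):
--             if a == r:
--                 continue
--             aa = list(wt)
--             aa[ci] = _AA64[codon_idx[ci] + (a - r) * w]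
--             chars[i] = NUCLEOTIDES[a]
--             mut = "".join(chars)
--             chars[i] = dna_sequence[i]
--             groups.setdefault("".join(aa), []).append(mut)
--     return groups
-- ===== Notes on version B (the rewrite author's own statement) =====
-- stated objective: faster
-- what changed: B replaces the codon-string dictionary pipeline by an arithmetic encoding: each base becomes its index 0..3, each codon an index 0..63 into a 64-character amino-acid string, and for each single-nt mutant only the one affected codon index is shifted by (alt-ref)*weight and substituted into the precomputed wildtype AA string, instead of A's enumerating full mutant strings and re-translating each one codon by codon through the dict.
import Mathlib
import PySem

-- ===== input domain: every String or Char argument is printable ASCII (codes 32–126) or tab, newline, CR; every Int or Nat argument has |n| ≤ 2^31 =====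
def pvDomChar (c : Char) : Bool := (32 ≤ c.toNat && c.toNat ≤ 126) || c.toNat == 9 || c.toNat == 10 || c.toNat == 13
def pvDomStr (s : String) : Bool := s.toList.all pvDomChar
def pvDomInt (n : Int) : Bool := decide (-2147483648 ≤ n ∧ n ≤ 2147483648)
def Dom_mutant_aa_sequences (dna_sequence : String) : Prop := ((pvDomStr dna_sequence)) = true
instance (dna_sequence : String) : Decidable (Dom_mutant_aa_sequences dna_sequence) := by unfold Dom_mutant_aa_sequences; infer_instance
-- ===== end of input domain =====

-- B groups mutants by arithmetic codon encoding (base index 0..3, codon index 0..63 into a 64-char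
-- amino-acid string), recomputing only the single affected codon index per mutant instead of
-- re-translating the whole sequence; objective: faster, constant-factor. Return-value equivalence
-- is proved on Pre_ (A raises ValueError elsewhere).

-- shared module constant NUCLEOTIDES
def pvNucs : List Char := ['A', 'C', 'G', 'T']

-- ===== PORT A =====
-- CODON_TABLE of the Python module
def pvCodonTable : PySem.Dict (List Char) Char := PySem.Dict.mk [
  (['T','T','T'], 'F'), (['T','T','C'], 'F'), (['T','T','A'], 'L'), (['T','T','G'], 'L'),
  (['C','T','T'], 'L'), (['C','T','C'], 'L'), (['C','T','A'], 'L'), (['C','T','G'], 'L'),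
  (['A','T','T'], 'I'), (['A','T','C'], 'I'), (['A','T','A'], 'I'), (['A','T','G'], 'M'),
  (['G','T','T'], 'V'), (['G','T','C'], 'V'), (['G','T','A'], 'V'), (['G','T','G'], 'V'),
  (['T','C','T'], 'S'), (['T','C','C'], 'S'), (['T','C','A'], 'S'), (['T','C','G'], 'S'),
  (['C','C','T'], 'P'), (['C','C','C'], 'P'), (['C','C','A'], 'P'), (['C','C','G'], 'P'),
  (['A','C','T'], 'T'), (['A','C','C'], 'T'), (['A','C','A'], 'T'), (['A','C','G'], 'T'),
  (['G','C','T'], 'A'), (['G','C','C'], 'A'), (['G','C','A'], 'A'), (['G','C','G'], 'A'),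
  (['T','A','T'], 'Y'), (['T','A','C'], 'Y'), (['T','A','A'], '*'), (['T','A','G'], '*'),
  (['C','A','T'], 'H'), (['C','A','C'], 'H'), (['C','A','A'], 'Q'), (['C','A','G'], 'Q'),
  (['A','A','T'], 'N'), (['A','A','C'], 'N'), (['A','A','A'], 'K'), (['A','A','G'], 'K'),
  (['G','A','T'], 'D'), (['G','A','C'], 'D'), (['G','A','A'], 'E'), (['G','A','G'], 'E'),
  (['T','G','T'], 'C'), (['T','G','C'], 'C'), (['T','G','A'], '*'), (['T','G','G'], 'W'),
  (['C','G','T'], 'R'), (['C','G','C'], 'R'), (['C','G','A'], 'R'), (['C','G','G'], 'R'),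
  (['A','G','T'], 'S'), (['A','G','C'], 'S'), (['A','G','A'], 'R'), (['A','G','G'], 'R'),
  (['G','G','T'], 'G'), (['G','G','C'], 'G'), (['G','G','A'], 'G'), (['G','G','G'], 'G')]

-- translate's codon loop: the slice dna[i:i+3] always steps 3, so the loop consumes three chars at a
-- time; a short final slice (length % 3 ≠ 0) never occurs since translate checks the length first.
-- 'none' = the explicit 'raise ValueError' for an invalid codon.
def pvTranslateGo (l : List Char) : Option (List Char) :=
  match l with
  | [] => some []
  | a :: b :: c :: r =>
    match pvCodonTable.get? [a, b, c] with
    | none => none        -- raise ValueError(f"invalid codon …")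
    | some aa => (pvTranslateGo r).map (aa :: ·)
  | _ => none             -- unreachable: length checked divisible by 3

-- translate(dna): 'none' = ValueError("DNA sequence length … is not divisible by 3")
def pvTranslate (l : List Char) : Option (List Char) :=
  if l.length % 3 ≠ 0 then none else pvTranslateGo l

-- single_nt_mutations: 'none' = ValueError for an invalid base; otherwise the list of
-- ("".join(seq with seq[i]=alt), i, ref, alt) in position-then-NUCLEOTIDES order.
def pvSingleNtMutations (l : List Char) : Option (List (List Char × Int × Char × Char)) :=
  if l.all (fun c => c ∈ pvNucs) then
    some ((PySem.List.enumerate l).flatMap (fun p =>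
      (pvNucs.filter (fun alt => alt ≠ p.2)).map (fun alt =>
        (PySem.List.pySetD l p.1 alt, p.1, p.2, alt))))
  else none

-- the grouping loop of mutant_aa_sequences; 'none' = a ValueError raised by translate propagates
def pvGroupLoop (ms : List (List Char × Int × Char × Char))
    (g : PySem.Dict String (List String)) : Option (PySem.Dict String (List String)) :=
  match ms with
  | [] => some g
  | m :: rest =>
    match pvTranslate m.1 with
    | none => none
    | some aa =>
      -- groups.setdefault(aa, []).append(mutant_dna)
      pvGroupLoop rest (g.modify (String.ofList aa) [] (· ++ [String.ofList m.1]))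

def mutant_aa_sequences (dna_sequence : String) : List (String × List String) :=
  -- the exception ('none') propagates; '.getD []' only renders the ValueError cases (outside Pre_)
  (((pvSingleNtMutations dna_sequence.toList).bind
      (fun ms => pvGroupLoop ms PySem.Dict.empty)).map PySem.Dict.items).getD []

-- ===== PORT B =====
-- NUCLEOTIDES.find(base): the index of the base in "ACGT"; 'none' = -1, on which Source B raises
def pvBaseIdx? (c : Char) : Option Int :=
  if c = 'A' then some 0 else if c = 'C' then some 1
  else if c = 'G' then some 2 else if c = 'T' then some 3 else none

-- _AA64: amino acid of the codon with index 16*i0 + 4*i1 + i2 (bases indexed in "ACGT" order)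
def pvAA64 : List Char :=
  ['K','N','K','N','T','T','T','T','R','S','R','S','I','I','M','I',
   'Q','H','Q','H','P','P','P','P','R','R','R','R','L','L','L','L',
   'E','D','E','D','A','A','A','A','G','G','G','G','V','V','V','V',
   '*','Y','*','Y','S','S','S','S','*','C','W','C','L','F','L','F']

-- [16*idx[j] + 4*idx[j+1] + idx[j+2] for j in range(0, n, 3)]; the comprehension reads three
-- entries per step, and a short tail is unreachable (Source B checks n % 3 == 0 first)
def pvCodonIdxList : List Int → List Int
  | a :: b :: c :: r => (16 * a + 4 * b + c) :: pvCodonIdxList r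
  | _ => []

def mutant_aa_sequences_alt (dna_sequence : String) : List (String × List String) :=
  let l := dna_sequence.toList
  -- the validation loop builds idx, raising ValueError at the first invalid base
  match l.mapM pvBaseIdx? with
  | none => []                             -- ValueError: invalid base (outside Pre_)
  | some idxs =>
    if l.length % 3 ≠ 0 then []            -- ValueError: length not divisible by 3 (outside Pre_)
    else
      let codonIdx := pvCodonIdxList idxs
      let wt := codonIdx.map (fun c => PySem.List.pyGetD pvAA64 c '?')   -- _AA64[c], c always 0..63
      ((PySem.List.enumerate idxs).foldl (fun g p =>
          let ci := PySem.Int.floordiv p.1 3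
          let w := PySem.List.pyGetD [(16 : Int), 4, 1] (PySem.Int.mod p.1 3) 0
          (PySem.List.pyRange 0 4 1).foldl (fun g a =>
            if a = p.2 then g
            else
              let aaKey := PySem.List.pySetD wt ci
                (PySem.List.pyGetD pvAA64
                  (PySem.List.pyGetD codonIdx ci 0 + (a - p.2) * w) '?')
              let mutant := PySem.List.pySetD l p.1 (PySem.List.pyGetD pvNucs a 'A')
              g.modify (String.ofList aaKey) [] (· ++ [String.ofList mutant])) g)
        PySem.Dict.empty).items

-- ===== PRECONDITION & SPEC =====
-- A raises ValueError exactly when some base is not a valid nucleotide, or when the length is not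
-- divisible by 3 (the empty sequence returns {}); Pre_ excludes exactly those.
def Pre_mutant_aa_sequences (dna_sequence : String) : Prop :=
  (dna_sequence.toList.all (fun c => c ∈ pvNucs)) = true ∧
    dna_sequence.toList.length % 3 = 0

instance (dna_sequence : String) : Decidable (Pre_mutant_aa_sequences dna_sequence) := by
  unfold Pre_mutant_aa_sequences; infer_instance

def pvWitness_mutant_aa_sequences : String := "ACGTGA"

def Spec_mutant_aa_sequences (dna_sequence : String) (out : List (String × List String)) : Prop := out = mutant_aa_sequences_alt dna_sequence
instance (dna_sequence : String) (out : List (String × List String)) : Decidable (Spec_mutant_aa_sequences dna_sequence out) := by unfold Spec_mutant_aa_sequences; infer_instance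

-- ===== CLAIM (what is proved, stated in full; the proofs are below) =====
def Claim_equal_mutant_aa_sequences : Prop := ∀ (dna_sequence : String), Dom_mutant_aa_sequences dna_sequence → Pre_mutant_aa_sequences dna_sequence → Spec_mutant_aa_sequences dna_sequence (mutant_aa_sequences dna_sequence)

-- ===== LEMMAS AND PROOFS =====

-- proof-side total base index (agrees with pvBaseIdx? on valid bases)
def pvIdx (c : Char) : Int :=
  if c = 'A' then 0 else if c = 'C' then 1 else if c = 'G' then 2 else 3

-- proof-side codon index of a chunk
def pvCIdx (t : List Char) : Int :=
  16 * pvIdx (t.getD 0 'A') + 4 * pvIdx (t.getD 1 'A') + pvIdx (t.getD 2 'A')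

-- A-side chunking of the sequence (matches pvTranslateGo's consumption)
def pvChunk3 (l : List Char) : List (List Char) :=
  match l with
  | [] => []
  | a :: b :: c :: r => [a, b, c] :: pvChunk3 r
  | r => [r]

def pvLookupAA (c : List Char) : Char := (pvCodonTable.get? c).getD '?'

theorem pvBaseIdx?_valid (c : Char) (h : c ∈ pvNucs) : pvBaseIdx? c = some (pvIdx c) := by
  fin_cases h <;> decide

theorem pvMapM_valid (l : List Char) (h : ∀ c ∈ l, c ∈ pvNucs) :
    l.mapM pvBaseIdx? = some (l.map pvIdx) := by
  induction l with
  | nil => rfl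
  | cons a t ih =>
    rw [List.mapM_cons, pvBaseIdx?_valid a (h a (by simp)),
      ih (fun x hx => h x (by simp [hx]))]
    rfl

set_option maxRecDepth 10000 in
theorem pvTable64 (a b c : Char) (ha : a ∈ pvNucs) (hb : b ∈ pvNucs) (hc : c ∈ pvNucs) :
    pvCodonTable.get? [a, b, c] =
      some (PySem.List.pyGetD pvAA64 (16 * pvIdx a + 4 * pvIdx b + pvIdx c) '?') := by
  fin_cases ha <;> fin_cases hb <;> fin_cases hc <;> decide

theorem pvLookupAA_eq (a b c : Char) (ha : a ∈ pvNucs) (hb : b ∈ pvNucs) (hc : c ∈ pvNucs) :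
    pvLookupAA [a, b, c] = PySem.List.pyGetD pvAA64 (16 * pvIdx a + 4 * pvIdx b + pvIdx c) '?' := by
  unfold pvLookupAA
  rw [pvTable64 a b c ha hb hc, Option.getD_some]

-- one-step unfoldings of the recursive helpers (rw-friendly forms)
theorem pvChunk3_cons (a b c : Char) (r : List Char) :
    pvChunk3 (a :: b :: c :: r) = [a, b, c] :: pvChunk3 r := rfl

theorem pvTranslateGo_cons (a b c aa : Char) (r : List Char)
    (h : pvCodonTable.get? [a, b, c] = some aa) :
    pvTranslateGo (a :: b :: c :: r) = (pvTranslateGo r).map (aa :: ·) := by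
  rw [show pvTranslateGo (a :: b :: c :: r) =
      (match pvCodonTable.get? [a, b, c] with
       | none => none
       | some aa => (pvTranslateGo r).map (aa :: ·)) from rfl, h]

theorem pvGroupLoop_cons (m : List Char × Int × Char × Char)
    (ms : List (List Char × Int × Char × Char)) (g : PySem.Dict String (List String))
    (aa : List Char) (h : pvTranslate m.1 = some aa) :
    pvGroupLoop (m :: ms) g =
      pvGroupLoop ms (g.modify (String.ofList aa) [] (· ++ [String.ofList m.1])) := by
  rw [show pvGroupLoop (m :: ms) g =
      (match pvTranslate m.1 with
       | none => none
       | some aa => pvGroupLoop ms (g.modify (String.ofList aa) [] (· ++ [String.ofList m.1])))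
      from rfl, h]

-- a non-empty list that is not a full codon chunk has length not divisible by 3
theorem pvShortTail (t : List Char) (h1 : t = [] → False)
    (h2 : ∀ (a b c : Char) (r : List Char), t = a :: b :: c :: r → False) :
    t.length % 3 ≠ 0 := by
  rcases t with _ | ⟨a, t⟩
  · exact absurd rfl h1
  rcases t with _ | ⟨b, t⟩
  · simp
  rcases t with _ | ⟨c, t⟩
  · simp
  · exact absurd rfl (h2 a b c t)

-- on a valid, length-divisible sequence the codon loop succeeds with the chunkwise translation
theorem pvTranslateGo_valid (l : List Char) (hv : ∀ c ∈ l, c ∈ pvNucs)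
    (hl : l.length % 3 = 0) : pvTranslateGo l = some ((pvChunk3 l).map pvLookupAA) := by
  induction l using pvChunk3.induct with
  | case1 => rfl
  | case2 a b c r ih =>
    have hF : pvCodonTable.get? [a, b, c] = some (pvLookupAA [a, b, c]) := by
      rw [pvTable64 a b c (hv a (by simp)) (hv b (by simp)) (hv c (by simp)),
        pvLookupAA_eq a b c (hv a (by simp)) (hv b (by simp)) (hv c (by simp))]
    have hlr : r.length % 3 = 0 := by simp only [List.length_cons] at hl; omega
    rw [pvTranslateGo_cons a b c _ r hF, ih (fun x hx => hv x (by simp [hx])) hlr,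
      pvChunk3_cons]
    rfl
  | case3 t h1 h2 => exact absurd hl (pvShortTail t h1 h2)

-- the key lemma: translating a single-base mutant is the wildtype chunk translation with only
-- the affected codon's AA replaced
theorem pvTranslateGo_set (l : List Char) (hv : ∀ c ∈ l, c ∈ pvNucs) (hl : l.length % 3 = 0)
    (k : Nat) (hk : k < l.length) (alt : Char) (halt : alt ∈ pvNucs) :
    pvTranslateGo (l.set k alt) =
      some (((pvChunk3 l).map pvLookupAA).take (k / 3) ++
        [pvLookupAA (((pvChunk3 l).getD (k / 3) []).take (k % 3) ++ [alt] ++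
          ((pvChunk3 l).getD (k / 3) []).drop (k % 3 + 1))] ++
        ((pvChunk3 l).map pvLookupAA).drop (k / 3 + 1)) := by
  induction l using pvChunk3.induct generalizing k with
  | case1 => simp at hk
  | case2 a b c r ih =>
    have hvr : ∀ x ∈ r, x ∈ pvNucs := fun x hx => hv x (by simp [hx])
    have hlr : r.length % 3 = 0 := by simp only [List.length_cons] at hl; omega
    have hR := pvTranslateGo_valid r hvr hlr
    by_cases h3 : k < 3
    · have hA : pvCodonTable.get? [alt, b, c] = some (pvLookupAA [alt, b, c]) := by
        rw [pvTable64 alt b c halt (hv b (by simp)) (hv c (by simp)),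
          pvLookupAA_eq alt b c halt (hv b (by simp)) (hv c (by simp))]
      have hB : pvCodonTable.get? [a, alt, c] = some (pvLookupAA [a, alt, c]) := by
        rw [pvTable64 a alt c (hv a (by simp)) halt (hv c (by simp)),
          pvLookupAA_eq a alt c (hv a (by simp)) halt (hv c (by simp))]
      have hC : pvCodonTable.get? [a, b, alt] = some (pvLookupAA [a, b, alt]) := by
        rw [pvTable64 a b alt (hv a (by simp)) (hv b (by simp)) halt,
          pvLookupAA_eq a b alt (hv a (by simp)) (hv b (by simp)) halt]
      interval_cases k
      · rw [show (a :: b :: c :: r).set 0 alt = alt :: b :: c :: r from rfl,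
          pvTranslateGo_cons _ _ _ _ _ hA, hR]
        rfl
      · rw [show (a :: b :: c :: r).set 1 alt = a :: alt :: c :: r from rfl,
          pvTranslateGo_cons _ _ _ _ _ hB, hR]
        rfl
      · rw [show (a :: b :: c :: r).set 2 alt = a :: b :: alt :: r from rfl,
          pvTranslateGo_cons _ _ _ _ _ hC, hR]
        rfl
    · have hk' : k - 3 < r.length := by simp only [List.length_cons] at hk; omega
      have e1 : k / 3 = (k - 3) / 3 + 1 := by omega
      have e2 : k % 3 = (k - 3) % 3 := by omega
      have hF : pvCodonTable.get? [a, b, c] = some (pvLookupAA [a, b, c]) := by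
        rw [pvTable64 a b c (hv a (by simp)) (hv b (by simp)) (hv c (by simp)),
          pvLookupAA_eq a b c (hv a (by simp)) (hv b (by simp)) (hv c (by simp))]
      have eset : (a :: b :: c :: r).set k alt = a :: b :: c :: r.set (k - 3) alt := by
        match k, h3 with
        | (n + 3), _ => rfl
      rw [eset, pvTranslateGo_cons _ _ _ _ _ hF, ih hvr hlr (k - 3) hk']
      simp only [Option.map_some, pvChunk3_cons, e1, e2, List.map_cons, List.take_succ_cons,
        List.getD_cons_succ, List.drop_succ_cons, List.cons_append]
  | case3 t h1 h2 => exact absurd hl (pvShortTail t h1 h2)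

-- when every mutant translates, the exception-threaded grouping loop is a plain fold
theorem pvGroupLoop_eq_foldl (ms : List (List Char × Int × Char × Char))
    (g : PySem.Dict String (List String))
    (h : ∀ m ∈ ms, (pvTranslate m.1).isSome) :
    pvGroupLoop ms g = some (ms.foldl (fun g m =>
      g.modify (String.ofList ((pvTranslate m.1).getD [])) [] (· ++ [String.ofList m.1])) g) := by
  induction ms generalizing g with
  | nil => rfl
  | cons m rest ih =>
    obtain ⟨aa, haa⟩ := Option.isSome_iff_exists.mp (h m (by simp))
    rw [pvGroupLoop_cons m rest g aa haa, ih _ (fun x hx => h x (by simp [hx])),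
      List.foldl_cons, haa, Option.getD_some]

-- B-side structural lemmas
theorem pvEnumerate_map {α β : Type} (f : α → β) (l : List α) (s : Int) :
    PySem.List.enumerate (l.map f) s = (PySem.List.enumerate l s).map (fun p => (p.1, f p.2)) := by
  induction l generalizing s with
  | nil => rfl
  | cons a t ih =>
    simp only [List.map_cons, PySem.List.enumerate_cons, ih]

theorem pvCodonIdxList_eq (l : List Char) (hl : l.length % 3 = 0) :
    pvCodonIdxList (l.map pvIdx) = (pvChunk3 l).map pvCIdx := by
  induction l using pvChunk3.induct with
  | case1 => rfl
  | case2 a b c r ih =>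
    have hlr : r.length % 3 = 0 := by simp only [List.length_cons] at hl; omega
    simp only [List.map_cons, pvChunk3_cons]
    rw [show pvCodonIdxList (pvIdx a :: pvIdx b :: pvIdx c :: r.map pvIdx) =
      (16 * pvIdx a + 4 * pvIdx b + pvIdx c) :: pvCodonIdxList (r.map pvIdx) from rfl, ih hlr]
    rfl
  | case3 t h1 h2 => exact absurd hl (pvShortTail t h1 h2)

theorem pvChunk3_length (l : List Char) (hl : l.length % 3 = 0) :
    (pvChunk3 l).length = l.length / 3 := by
  induction l using pvChunk3.induct with
  | case1 => rfl
  | case2 a b c r ih =>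
    have hlr : r.length % 3 = 0 := by simp only [List.length_cons] at hl; omega
    simp only [pvChunk3_cons, List.length_cons, ih hlr]
    omega
  | case3 t h1 h2 => exact absurd hl (pvShortTail t h1 h2)

-- the chunk holding position k is a triple of elements of l whose (k % 3)-th entry is l[k]
theorem pvChunkAt (l : List Char) (hl : l.length % 3 = 0) (k : Nat) (hk : k < l.length) :
    ∃ x y z, (pvChunk3 l).getD (k / 3) [] = [x, y, z] ∧ x ∈ l ∧ y ∈ l ∧ z ∈ l ∧
      [x, y, z].getD (k % 3) 'A' = l.getD k 'A' := by
  induction l using pvChunk3.induct generalizing k with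
  | case1 => simp at hk
  | case2 a b c r ih =>
    by_cases h3 : k < 3
    · refine ⟨a, b, c, ?_, by simp, by simp, by simp, ?_⟩
      · interval_cases k <;> rfl
      · interval_cases k <;> rfl
    · have hlr : r.length % 3 = 0 := by simp only [List.length_cons] at hl; omega
      have hk' : k - 3 < r.length := by simp only [List.length_cons] at hk; omega
      obtain ⟨x, y, z, he, hx, hy, hz, hg⟩ := ih hlr (k - 3) hk'
      have e1 : k / 3 = (k - 3) / 3 + 1 := by omega
      have e2 : k % 3 = (k - 3) % 3 := by omega
      refine ⟨x, y, z, ?_, by simp [hx], by simp [hy], by simp [hz], ?_⟩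
      · rw [e1, pvChunk3_cons, List.getD_cons_succ, he]
      · rw [e2, hg]
        have e3 : k = (k - 3) + 3 := by omega
        rw [e3]
        rfl
  | case3 t h1 h2 => exact absurd hl (pvShortTail t h1 h2)

-- every chunk of a valid sequence is a triple of valid bases
theorem pvChunkMem (l : List Char) (hv : ∀ c ∈ l, c ∈ pvNucs) (hl : l.length % 3 = 0) :
    ∀ t ∈ pvChunk3 l, ∃ x y z, t = [x, y, z] ∧ x ∈ pvNucs ∧ y ∈ pvNucs ∧ z ∈ pvNucs := by
  induction l using pvChunk3.induct with
  | case1 => simp [pvChunk3]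
  | case2 a b c r ih =>
    intro t ht
    rw [pvChunk3_cons] at ht
    rcases List.mem_cons.mp ht with h | h
    · exact ⟨a, b, c, h, hv a (by simp), hv b (by simp), hv c (by simp)⟩
    · exact ih (fun x hx => hv x (by simp [hx]))
        (by simp only [List.length_cons] at hl; omega) t h
  | case3 t h1 h2 => exact absurd hl (pvShortTail t h1 h2)

-- B's wt list is A's chunkwise wildtype translation
theorem pvWt_eq (l : List Char) (hv : ∀ c ∈ l, c ∈ pvNucs) (hl : l.length % 3 = 0) :
    ((pvChunk3 l).map pvCIdx).map (fun c => PySem.List.pyGetD pvAA64 c '?') =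
      (pvChunk3 l).map pvLookupAA := by
  rw [List.map_map]
  apply List.map_congr_left
  intro t ht
  obtain ⟨x, y, z, rfl, hx, hy, hz⟩ := pvChunkMem l hv hl t ht
  simp only [Function.comp_apply]
  rw [pvLookupAA_eq x y z hx hy hz]
  rfl

-- a valid base index picks the base back out of NUCLEOTIDES
theorem pvNucGet (c : Char) (h : c ∈ pvNucs) :
    PySem.List.pyGetD pvNucs (pvIdx c) 'A' = c := by
  fin_cases h <;> decide

-- the single updated amino acid, arithmetically: substituting base alt at offset off of the
-- chunk [x,y,z] looks up the shifted codon index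
theorem pvNewAA_eq (x y z alt : Char) (hx : x ∈ pvNucs) (hy : y ∈ pvNucs) (hz : z ∈ pvNucs)
    (halt : alt ∈ pvNucs) (off : Nat) (hoff : off < 3) :
    PySem.List.pyGetD pvAA64
        (pvCIdx [x, y, z] + (pvIdx alt - pvIdx ([x, y, z].getD off 'A')) *
          PySem.List.pyGetD [(16 : Int), 4, 1] ((off : Int)) 0) '?' =
      pvLookupAA ([x, y, z].take off ++ [alt] ++ [x, y, z].drop (off + 1)) := by
  have hc : pvCIdx [x, y, z] = 16 * pvIdx x + 4 * pvIdx y + pvIdx z := rfl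
  interval_cases off
  · rw [show ([x, y, z].take 0 ++ [alt] ++ [x, y, z].drop 1) = [alt, y, z] from rfl,
      pvLookupAA_eq alt y z halt hy hz, hc,
      show [x, y, z].getD 0 'A' = x from rfl,
      show PySem.List.pyGetD [(16 : Int), 4, 1] (((0 : Nat) : Int)) 0 = 16 from by decide,
      show 16 * pvIdx x + 4 * pvIdx y + pvIdx z + (pvIdx alt - pvIdx x) * 16 =
        16 * pvIdx alt + 4 * pvIdx y + pvIdx z from by ring]
  · rw [show ([x, y, z].take 1 ++ [alt] ++ [x, y, z].drop 2) = [x, alt, z] from rfl,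
      pvLookupAA_eq x alt z hx halt hz, hc,
      show [x, y, z].getD 1 'A' = y from rfl,
      show PySem.List.pyGetD [(16 : Int), 4, 1] (((1 : Nat) : Int)) 0 = 4 from by decide,
      show 16 * pvIdx x + 4 * pvIdx y + pvIdx z + (pvIdx alt - pvIdx y) * 4 =
        16 * pvIdx x + 4 * pvIdx alt + pvIdx z from by ring]
  · rw [show ([x, y, z].take 2 ++ [alt] ++ [x, y, z].drop 3) = [x, y, alt] from rfl,
      pvLookupAA_eq x y alt hx hy halt, hc,
      show [x, y, z].getD 2 'A' = z from rfl,
      show PySem.List.pyGetD [(16 : Int), 4, 1] (((2 : Nat) : Int)) 0 = 1 from by decide,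
      show 16 * pvIdx x + 4 * pvIdx y + pvIdx z + (pvIdx alt - pvIdx z) * 1 =
        16 * pvIdx x + 4 * pvIdx y + pvIdx alt from by ring]
  
-- one dict update of B's inner loop equals the corresponding update of A's
theorem pvStep_eq (l : List Char) (hv : ∀ c ∈ l, c ∈ pvNucs) (hl : l.length % 3 = 0)
    (k : Nat) (hk : k < l.length) (alt : Char) (halt : alt ∈ pvNucs) (a : Int)
    (ha : a = pvIdx alt) (g : PySem.Dict String (List String)) :
    g.modify (String.ofList (PySem.List.pySetD ((pvCodonIdxList (l.map pvIdx)).map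
          (fun c => PySem.List.pyGetD pvAA64 c '?')) (PySem.Int.floordiv (k : Int) 3)
        (PySem.List.pyGetD pvAA64
          (PySem.List.pyGetD (pvCodonIdxList (l.map pvIdx)) (PySem.Int.floordiv (k : Int) 3) 0 +
            (a - pvIdx (l.getD k 'A')) *
              PySem.List.pyGetD [(16 : Int), 4, 1] (PySem.Int.mod (k : Int) 3) 0) '?'))) []
        (· ++ [String.ofList (PySem.List.pySetD l (k : Int) (PySem.List.pyGetD pvNucs a 'A'))]) =
      g.modify (String.ofList ((pvTranslate (PySem.List.pySetD l (k : Int) alt)).getD [])) []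
        (· ++ [String.ofList (PySem.List.pySetD l (k : Int) alt)]) := by
  subst ha
  rw [pvNucGet alt halt]
  have hkey : PySem.List.pySetD ((pvCodonIdxList (l.map pvIdx)).map
        (fun c => PySem.List.pyGetD pvAA64 c '?')) (PySem.Int.floordiv (k : Int) 3)
      (PySem.List.pyGetD pvAA64
        (PySem.List.pyGetD (pvCodonIdxList (l.map pvIdx)) (PySem.Int.floordiv (k : Int) 3) 0 +
          (pvIdx alt - pvIdx (l.getD k 'A')) *
            PySem.List.pyGetD [(16 : Int), 4, 1] (PySem.Int.mod (k : Int) 3) 0) '?') =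
      (pvTranslate (PySem.List.pySetD l (k : Int) alt)).getD [] := by
    obtain ⟨x, y, z, he, hx, hy, hz, hg⟩ := pvChunkAt l hl k hk
    have hx' := hv x hx
    have hy' := hv y hy
    have hz' := hv z hz
    have hoff : k % 3 < 3 := Nat.mod_lt _ (by omega)
    have hciL : k / 3 < (pvChunk3 l).length := by
      rw [pvChunk3_length l hl]; omega
    have hfd : PySem.Int.floordiv (k : Int) 3 = ((k / 3 : Nat) : Int) := by
      exact_mod_cast PySem.Int.floordiv_natCast k 3
    have hmd : PySem.Int.mod (k : Int) 3 = ((k % 3 : Nat) : Int) := by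
      exact_mod_cast PySem.Int.mod_natCast k 3
    -- the codon index list entries
    rw [pvCodonIdxList_eq l hl]
    have hcidx : PySem.List.pyGetD ((pvChunk3 l).map pvCIdx) (PySem.Int.floordiv (k : Int) 3) 0 =
        pvCIdx [x, y, z] := by
      rw [hfd, PySem.List.pyGetD_natCast, List.getD_eq_getElem?_getD,
        List.getElem?_map]
      rw [show (pvChunk3 l)[k / 3]? = some ((pvChunk3 l).getD (k / 3) []) from by
        rw [List.getD_eq_getElem?_getD, List.getElem?_eq_getElem hciL]; rfl]
      rw [he]
      rfl
    rw [hcidx]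
    -- the wildtype AA list
    rw [pvWt_eq l hv hl]
    -- translate of the mutant
    rw [PySem.List.pySetD_natCast]
    unfold pvTranslate
    rw [if_neg (by simp [List.length_set, hl])]
    rw [pvTranslateGo_set l hv hl k hk alt halt, Option.getD_some]
    -- the set becomes take/cons/drop
    rw [hfd, PySem.List.pySetD_natCast]
    have hciL' : k / 3 < ((pvChunk3 l).map pvLookupAA).length := by
      rw [List.length_map]; exact hciL
    rw [List.set_eq_take_cons_drop _ hciL']
    -- and the substituted AA matches arithmetically
    rw [hmd]
    have href : pvIdx (l.getD k 'A') = pvIdx ([x, y, z].getD (k % 3) 'A') := by rw [hg]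
    rw [href, he, pvNewAA_eq x y z alt hx' hy' hz' halt (k % 3) hoff]
    simp
  rw [hkey, PySem.List.pySetD_natCast]

-- ===== VERDICT (by name: the statement is the Claim_ definition above) =====
set_option maxRecDepth 10000 in
theorem mutant_aa_sequences_spec : Claim_equal_mutant_aa_sequences := by
  unfold Claim_equal_mutant_aa_sequences
  intro s _ hpre
  obtain ⟨hvb, hl⟩ := hpre
  unfold Spec_mutant_aa_sequences mutant_aa_sequences mutant_aa_sequences_alt
    pvSingleNtMutations
  have hv : ∀ c ∈ s.toList, c ∈ pvNucs := by simpa [List.all_eq_true] using hvb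
  set l := s.toList with hldef
  rw [if_pos hvb]
  simp only [pvMapM_valid l hv, hl]
  -- every generated mutant translates, to the substituted AA list
  have hmut : ∀ (k : Nat), k < l.length → ∀ alt ∈ pvNucs,
      (pvTranslate (l.set k alt)).isSome := by
    intro k hk alt halt
    unfold pvTranslate
    rw [if_neg (by simp [List.length_set, hl])]
    rw [pvTranslateGo_set l hv hl k hk alt halt]
    rfl
  have hsome : ∀ m ∈ (PySem.List.enumerate l).flatMap (fun p =>
      (pvNucs.filter (fun alt => alt ≠ p.2)).map (fun alt =>
        (PySem.List.pySetD l p.1 alt, p.1, p.2, alt))), (pvTranslate m.1).isSome := by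
    intro m hm
    simp only [List.mem_flatMap, List.mem_map, List.mem_filter] at hm
    obtain ⟨p, hp, alt, ⟨haltn, _⟩, rfl⟩ := hm
    obtain ⟨k, hk, rfl⟩ := (PySem.List.mem_enumerate_iff _ _ _).mp hp
    simp only [zero_add, PySem.List.pySetD_natCast]
    exact hmut k hk alt haltn
  simp only [Option.bind_some]
  rw [pvGroupLoop_eq_foldl _ _ hsome, Option.map_some, Option.getD_some]
  congr 1
  rw [List.foldl_flatMap]
  -- B's enumerate over the index list is A's enumerate with pvIdx applied
  rw [pvEnumerate_map pvIdx l 0, List.foldl_map]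
  apply PySem.List.foldl_congr_mem
  intro acc p hp
  obtain ⟨k, hk, rfl⟩ := (PySem.List.mem_enumerate_iff _ _ _).mp hp
  rw [List.foldl_map]
  simp only [zero_add]
  have hget : l.getD k 'A' = l[k] := by
    rw [List.getD_eq_getElem?_getD, List.getElem?_eq_getElem hk]; rfl
  rw [← hget, show PySem.List.pyRange 0 4 1 = [0, 1, 2, 3] from by decide]
  have hrefn : l.getD k 'A' ∈ pvNucs := by rw [hget]; exact hv _ (List.getElem_mem hk)
  have hstep := fun (alt : Char) (halt : alt ∈ pvNucs) (a : Int) (ha : a = pvIdx alt)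
      (g : PySem.Dict String (List String)) => pvStep_eq l hv hl k hk alt halt a ha g
  revert hstep
  generalize l.getD k 'A' = ref at hrefn ⊢
  intro hstep
  fin_cases hrefn
  · -- ref = 'A'
    rw [show pvNucs.filter (fun alt => alt ≠ 'A') = ['C', 'G', 'T'] from by decide]
    simp only [List.foldl_cons, List.foldl_nil]
    rw [if_pos (show (0 : Int) = pvIdx 'A' from by decide),
      if_neg (show ¬((1 : Int) = pvIdx 'A') from by decide),
      if_neg (show ¬((2 : Int) = pvIdx 'A') from by decide),
      if_neg (show ¬((3 : Int) = pvIdx 'A') from by decide),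
      hstep 'C' (by decide) 1 (by decide), hstep 'G' (by decide) 2 (by decide),
      hstep 'T' (by decide) 3 (by decide)]
  · -- ref = 'C'
    rw [show pvNucs.filter (fun alt => alt ≠ 'C') = ['A', 'G', 'T'] from by decide]
    simp only [List.foldl_cons, List.foldl_nil]
    rw [if_neg (show ¬((0 : Int) = pvIdx 'C') from by decide),
      if_pos (show (1 : Int) = pvIdx 'C' from by decide),
      if_neg (show ¬((2 : Int) = pvIdx 'C') from by decide),
      if_neg (show ¬((3 : Int) = pvIdx 'C') from by decide),
      hstep 'A' (by decide) 0 (by decide), hstep 'G' (by decide) 2 (by decide),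
      hstep 'T' (by decide) 3 (by decide)]
  · -- ref = 'G'
    rw [show pvNucs.filter (fun alt => alt ≠ 'G') = ['A', 'C', 'T'] from by decide]
    simp only [List.foldl_cons, List.foldl_nil]
    rw [if_neg (show ¬((0 : Int) = pvIdx 'G') from by decide),
      if_neg (show ¬((1 : Int) = pvIdx 'G') from by decide),
      if_pos (show (2 : Int) = pvIdx 'G' from by decide),
      if_neg (show ¬((3 : Int) = pvIdx 'G') from by decide),
      hstep 'A' (by decide) 0 (by decide), hstep 'C' (by decide) 1 (by decide),
      hstep 'T' (by decide) 3 (by decide)]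
  · -- ref = 'T'
    rw [show pvNucs.filter (fun alt => alt ≠ 'T') = ['A', 'C', 'G'] from by decide]
    simp only [List.foldl_cons, List.foldl_nil]
    rw [if_neg (show ¬((0 : Int) = pvIdx 'T') from by decide),
      if_neg (show ¬((1 : Int) = pvIdx 'T') from by decide),
      if_neg (show ¬((2 : Int) = pvIdx 'T') from by decide),
      if_pos (show (3 : Int) = pvIdx 'T' from by decide),
      hstep 'A' (by decide) 0 (by decide), hstep 'C' (by decide) 1 (by decide),
      hstep 'G' (by decide) 2 (by decide)]
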